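-- pv_equiv track=rewrite | github.com/rdinesh808/pylogicalprograms | pylogicalprograms/patterns/DineshNamePattern.py | print_d
-- ===== SOURCE A (Python) =====
-- def print_d(size):
--     start = 1
--     end = size + 1
--     d_lines = []
--     for row in range(start, end):
--         line = ""
--         for col in range(start, end):
--             if col == start or (col == size and row != start and row != size) or (row == start or row == size) and col < size:
--                 line += "* "
--             else:
--                 line += "  "
--         d_lines.append(line)
--     return d_lines
-- ===== SOURCE B (Python) =====
-- def print_d(size):
--     if size <= 0:
--         return []
--     if size == 1:
--         return ["* "]
--     lines = []
--     for row in range(1, size + 1):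
--         if row == 1 or row == size:
--             lines.append("* " * (size - 1) + "  ")
--         else:
--             lines.append("* " + "  " * (size - 2) + "* ")
--     return lines
-- ===== Notes on version B (the rewrite author's own statement) =====
-- stated objective: simpler
-- what changed: Replaces the nested per-column condition loop with a closed-form line per row class (border rows are '* '*(size-1)+' ', interior rows '* '+' '*(size-2)+'* '), emitted once each.
import Mathlib
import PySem

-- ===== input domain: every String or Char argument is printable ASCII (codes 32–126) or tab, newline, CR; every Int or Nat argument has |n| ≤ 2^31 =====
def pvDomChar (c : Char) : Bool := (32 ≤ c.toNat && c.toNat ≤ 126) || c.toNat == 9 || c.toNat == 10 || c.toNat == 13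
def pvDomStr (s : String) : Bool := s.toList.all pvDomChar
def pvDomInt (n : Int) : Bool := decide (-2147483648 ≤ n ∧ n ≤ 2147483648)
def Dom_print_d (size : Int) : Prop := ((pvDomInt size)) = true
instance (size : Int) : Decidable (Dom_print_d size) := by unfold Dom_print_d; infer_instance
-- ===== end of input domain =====

-- B replaces the per-column test with a closed-form border/interior line per row (simpler decomposition).
-- Lines are built as List Char (exact for string concatenation) and wrapped with String.mk.

-- ===== PORT A =====
def print_d (size : Int) : List String :=
  (PySem.List.pyRange 1 (size + 1) 1).foldl (fun d_lines row =>
    d_lines ++ [String.mk ((PySem.List.pyRange 1 (size + 1) 1).foldl (fun line col =>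
        if col = 1 ∨ (col = size ∧ row ≠ 1 ∧ row ≠ size) ∨ ((row = 1 ∨ row = size) ∧ col < size)
        then line ++ ['*', ' '] else line ++ [' ', ' ']) [])]) []

-- ===== PORT B =====
def print_d_alt (size : Int) : List String :=
  if size ≤ 0 then []
  else if size = 1 then [String.mk ['*', ' ']]
  else
    (PySem.List.pyRange 1 (size + 1) 1).foldl (fun lines row =>
      lines ++ [if row = 1 ∨ row = size
        then String.mk ((List.replicate (size - 1).toNat ['*', ' ']).flatten ++ [' ', ' '])
        else String.mk (['*', ' '] ++ (List.replicate (size - 2).toNat [' ', ' ']).flatten ++ ['*', ' '])]) []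

-- ===== PRECONDITION & SPEC =====
def Spec_print_d (size : Int) (out : List String) : Prop := out = print_d_alt size
instance (size : Int) (out : List String) : Decidable (Spec_print_d size out) := by unfold Spec_print_d; infer_instance

-- ===== CLAIM =====
def Claim_equal_print_d : Prop := ∀ (size : Int), Dom_print_d size → Spec_print_d size (print_d size)

-- ===== LEMMAS AND PROOFS =====

-- the inner loop appends a chunk per column: it is the flatten of the per-column chunks
theorem pv_foldl_chunks (P : Int → Prop) [DecidablePred P] (x y : List Char) :
    ∀ (l : List Int) (a : List Char),
      l.foldl (fun s c => if P c then s ++ x else s ++ y) a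
        = a ++ (l.map (fun c => if P c then x else y)).flatten := by
  intro l
  induction l with
  | nil => intro a; simp
  | cons c l ih =>
      intro a
      by_cases h : P c <;> simp [h, ih, List.append_assoc]

-- the outer loop appends one string per row: it is the map of rows
theorem pv_foldl_push (f : Int → String) :
    ∀ (l : List Int) (a : List String),
      l.foldl (fun d r => d ++ [f r]) a = a ++ l.map f := by
  intro l
  induction l with
  | nil => intro a; simp
  | cons c l ih => intro a; simp [ih]

theorem pv_range_map_lt {α : Type} (m : ℕ) (x y : α) :
    (List.range (m + 1)).map (fun k => if k < m then x else y)
      = List.replicate m x ++ [y] := by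
  rw [List.range_succ, List.map_append]
  congr 1
  · rw [List.map_congr_left (fun k hk => if_pos (List.mem_range.mp hk))]
    simp [List.map_const']
  · simp

theorem pv_range_map_edge {α : Type} (m : ℕ) (x y : α) :
    (List.range (m + 2)).map (fun k => if k = 0 ∨ k = m + 1 then x else y)
      = x :: (List.replicate m y ++ [x]) := by
  rw [show m + 2 = (m + 1) + 1 from rfl, List.range_succ_eq_map, List.range_succ]
  simp only [List.map_cons, List.map_append, List.map_map, List.map_nil]
  have h1 : (List.range m).map ((fun k => if k = 0 ∨ k = m + 1 then x else y) ∘ Nat.succ)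
      = List.replicate m y := by
    rw [List.map_congr_left (fun k hk => by
      have := List.mem_range.mp hk
      simp only [Function.comp]
      rw [if_neg (by omega)])]
    simp [List.map_const']
  rw [h1]
  simp

theorem pv_print_d_eq_map (size : Int) :
    print_d size
      = (PySem.List.pyRange 1 (size + 1) 1).map (fun row =>
          String.mk (((PySem.List.pyRange 1 (size + 1) 1).map (fun col =>
            if col = 1 ∨ (col = size ∧ row ≠ 1 ∧ row ≠ size) ∨ ((row = 1 ∨ row = size) ∧ col < size)
            then ['*', ' '] else [' ', ' '])).flatten)) := by
  unfold print_d
  rw [pv_foldl_push (fun row =>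
        String.mk ((PySem.List.pyRange 1 (size + 1) 1).foldl (fun line col =>
          if col = 1 ∨ (col = size ∧ row ≠ 1 ∧ row ≠ size) ∨ ((row = 1 ∨ row = size) ∧ col < size)
          then line ++ ['*', ' '] else line ++ [' ', ' ']) []))]
  simp only [List.nil_append]
  apply List.map_congr_left
  intro row _
  rw [pv_foldl_chunks]
  simp

-- inner line of a border row (row = 1 or row = size), size = m + 2
theorem pv_line_border (m : ℕ) (row : Int) (hrow : row = 1 ∨ row = ((m : Int) + 2)) :
    ((PySem.List.pyRange 1 (((m : Int) + 2) + 1) 1).map (fun col =>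
        if col = 1 ∨ (col = ((m : Int) + 2) ∧ row ≠ 1 ∧ row ≠ ((m : Int) + 2))
           ∨ ((row = 1 ∨ row = ((m : Int) + 2)) ∧ col < ((m : Int) + 2))
        then ['*', ' '] else [' ', ' '])).flatten
      = (List.replicate (m + 1) ['*', ' ']).flatten ++ [' ', ' '] := by
  rw [PySem.List.pyRange_one]
  have hn : ((((m : Int) + 2) + 1) - 1).toNat = (m + 1) + 1 := by omega
  rw [hn, List.map_map]
  have hc : (List.range ((m + 1) + 1)).map
        ((fun col => if col = 1 ∨ (col = ((m : Int) + 2) ∧ row ≠ 1 ∧ row ≠ ((m : Int) + 2))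
            ∨ ((row = 1 ∨ row = ((m : Int) + 2)) ∧ col < ((m : Int) + 2))
          then ['*', ' '] else [' ', ' ']) ∘ (fun k : ℕ => (1 : Int) + k))
      = (List.range ((m + 1) + 1)).map (fun k => if k < m + 1 then ['*', ' '] else [' ', ' ']) := by
    apply List.map_congr_left
    intro k hk
    have hk' : k < (m + 1) + 1 := List.mem_range.mp hk
    simp only [Function.comp]
    by_cases h : k < m + 1
    · rw [if_pos h, if_pos (by right; right; exact ⟨hrow, by omega⟩)]
    · rw [if_neg h, if_neg (by omega)]
  rw [hc, pv_range_map_lt, List.flatten_append]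
  simp

-- inner line of an interior row (1 < row < size), size = m + 2
theorem pv_line_interior (m : ℕ) (row : Int) (h1 : 1 < row) (h2 : row < (m : Int) + 2) :
    ((PySem.List.pyRange 1 (((m : Int) + 2) + 1) 1).map (fun col =>
        if col = 1 ∨ (col = ((m : Int) + 2) ∧ row ≠ 1 ∧ row ≠ ((m : Int) + 2))
           ∨ ((row = 1 ∨ row = ((m : Int) + 2)) ∧ col < ((m : Int) + 2))
        then ['*', ' '] else [' ', ' '])).flatten
      = ['*', ' '] ++ (List.replicate m [' ', ' ']).flatten ++ ['*', ' '] := by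
  rw [PySem.List.pyRange_one]
  have hn : ((((m : Int) + 2) + 1) - 1).toNat = m + 2 := by omega
  rw [hn, List.map_map]
  have hc : (List.range (m + 2)).map
        ((fun col => if col = 1 ∨ (col = ((m : Int) + 2) ∧ row ≠ 1 ∧ row ≠ ((m : Int) + 2))
            ∨ ((row = 1 ∨ row = ((m : Int) + 2)) ∧ col < ((m : Int) + 2))
          then ['*', ' '] else [' ', ' ']) ∘ (fun k : ℕ => (1 : Int) + k))
      = (List.range (m + 2)).map (fun k => if k = 0 ∨ k = m + 1 then ['*', ' '] else [' ', ' ']) := by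
    apply List.map_congr_left
    intro k hk
    have hk' : k < m + 2 := List.mem_range.mp hk
    simp only [Function.comp]
    by_cases h : k = 0 ∨ k = m + 1
    · rw [if_pos h, if_pos (by omega)]
    · rw [if_neg h, if_neg (by omega)]
  rw [hc, pv_range_map_edge]
  simp [List.flatten_append]

-- ===== VERDICT =====
theorem print_d_spec : Claim_equal_print_d := by
  unfold Claim_equal_print_d
  intro size _
  unfold Spec_print_d
  by_cases h0 : size ≤ 0
  · unfold print_d print_d_alt
    rw [PySem.List.pyRange_one_eq_nil (by omega), if_pos h0]
    simp
  · by_cases h1 : size = 1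
    · subst h1; decide
    · obtain ⟨m, rfl⟩ : ∃ m : ℕ, size = (m : Int) + 2 := ⟨(size - 2).toNat, by omega⟩
      rw [pv_print_d_eq_map]
      unfold print_d_alt
      rw [if_neg h0, if_neg h1]
      rw [pv_foldl_push (fun row => if row = 1 ∨ row = ((m : Int) + 2)
            then String.mk ((List.replicate (((m : Int) + 2) - 1).toNat ['*', ' ']).flatten ++ [' ', ' '])
            else String.mk (['*', ' '] ++ (List.replicate (((m : Int) + 2) - 2).toNat [' ', ' ']).flatten ++ ['*', ' ']))]
      simp only [List.nil_append,
        show ((((m : Int) + 2) - 1).toNat = m + 1) from by omega,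
        show ((((m : Int) + 2) - 2).toNat = m) from by omega]
      apply List.map_congr_left
      intro row hrow
      have hmem : (1 : Int) ≤ row ∧ row < ((m : Int) + 2) + 1 :=
        (PySem.List.mem_pyRange_one).mp hrow
      by_cases hb : row = 1 ∨ row = ((m : Int) + 2)
      · rw [pv_line_border m row hb, if_pos hb]
      · push_neg at hb
        rw [pv_line_interior m row (by omega) (by omega), if_neg (by push_neg; exact hb)]
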